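-- pv_equiv track=rewrite | github.com/jiki-education/front-end | curriculum/src/exercises/formal-dinner/solution.py | remove_honorific
-- ===== SOURCE A (Python) =====
-- def remove_honorific(name):
--     adding = False
--     res = ""
--     for letter in name:
--         if adding:
--             res = res + letter
--         if letter == " ":
--             adding = True
--     return res
-- ===== SOURCE B (Python) =====
-- def remove_honorific(name):
--     idx = name.find(" ")
--     return "" if idx == -1 else name[idx + 1:]
-- ===== Notes on version B (the rewrite author's own statement) =====
-- stated objective: simpler
-- what changed: Replaces the character-by-character scan with a boolean flag and repeated string concatenation by a single find of the first space followed by one tail slice.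
import Mathlib
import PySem

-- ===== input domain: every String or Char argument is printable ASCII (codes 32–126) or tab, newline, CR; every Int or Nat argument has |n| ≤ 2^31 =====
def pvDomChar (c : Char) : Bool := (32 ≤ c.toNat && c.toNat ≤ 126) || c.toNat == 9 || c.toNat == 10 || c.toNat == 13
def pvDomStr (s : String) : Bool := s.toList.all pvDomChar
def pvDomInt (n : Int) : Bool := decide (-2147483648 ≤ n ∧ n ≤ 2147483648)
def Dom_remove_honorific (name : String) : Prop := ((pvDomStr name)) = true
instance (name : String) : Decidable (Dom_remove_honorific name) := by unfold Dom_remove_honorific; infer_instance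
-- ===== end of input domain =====

-- B replaces A's per-character scan with an 'adding' flag by one find of the first space plus a tail slice (objective: simpler).

-- ===== PORT A =====
-- loop state: (adding, res); res kept as List Char, turned into a String at return
def remove_honorific (name : String) : String :=
  let st := name.toList.foldl
    (fun (st : Bool × List Char) letter =>
      let res := if st.1 then st.2 ++ [letter] else st.2
      let adding := if letter = ' ' then true else st.1
      (adding, res))
    (false, [])
  String.ofList st.2

-- ===== PORT B =====
def remove_honorific_alt (name : String) : String :=
  let idx := PySem.Str.find name " "
  if idx = -1 then "" else PySem.Str.slice name (some (idx + 1)) none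

-- ===== PRECONDITION & SPEC =====
def Spec_remove_honorific (name : String) (out : String) : Prop := out = remove_honorific_alt name
instance (name : String) (out : String) : Decidable (Spec_remove_honorific name out) := by unfold Spec_remove_honorific; infer_instance

-- ===== CLAIM (what is proved, stated in full; the proofs are below) =====
def Claim_equal_remove_honorific : Prop := ∀ (name : String), Dom_remove_honorific name → Spec_remove_honorific name (remove_honorific name)

-- ===== LEMMAS AND PROOFS =====

def pvStepA : (Bool × List Char) → Char → (Bool × List Char) :=
  fun st letter =>
    let res := if st.1 then st.2 ++ [letter] else st.2
    let adding := if letter = ' ' then true else st.1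
    (adding, res)

theorem pvFoldA_true (l : List Char) : ∀ res, l.foldl pvStepA (true, res) = (true, res ++ l) := by
  induction l with
  | nil => intro res; simp
  | cons c t ih => intro res; simp [List.foldl, pvStepA, ih]

theorem pvFoldA_false (l : List Char) :
    (l.foldl pvStepA (false, [])).2 = (l.dropWhile (· ≠ ' ')).tail := by
  induction l with
  | nil => simp
  | cons c t ih =>
    by_cases hc : c = ' '
    · subst hc
      simp [List.foldl, pvStepA, pvFoldA_true]
    · simp [List.foldl, pvStepA, hc, ih]

-- dropWhile characterised by the position of the first failing element
theorem pvDropWhile_eq_drop (l : List Char) (n : Nat) (hn : n < l.length)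
    (hall : ∀ j (h : j < n), l[j]'(by omega) ≠ ' ') (hit : l[n]'hn = ' ') :
    l.dropWhile (· ≠ ' ') = l.drop n := by
  induction l generalizing n with
  | nil => simp at hn
  | cons c t ih =>
    cases n with
    | zero => simp_all
    | succ m =>
      have hc : c ≠ ' ' := hall 0 (by omega)
      have hdec : (decide (c ≠ ' ')) = true := by simp [hc]
      simp only [List.dropWhile_cons, hdec, if_true, List.drop_succ_cons]
      exact ih m (by simpa using hn) (fun j hj => hall (j+1) (by omega)) (by simpa using hit)

theorem pv_no_space (l : List Char) (h : ' ' ∉ l) : l.dropWhile (· ≠ ' ') = [] := by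
  simp only [List.dropWhile_eq_nil_iff]
  intro x hx
  simp only [decide_eq_true_eq]
  exact fun hxe => h (hxe ▸ hx)

theorem remove_honorific_spec : Claim_equal_remove_honorific := by
  intro name _
  unfold Spec_remove_honorific remove_honorific remove_honorific_alt
  show String.ofList (name.toList.foldl pvStepA (false, [])).2 = _
  rw [pvFoldA_false]
  by_cases hmem : ' ' ∈ name.toList
  · have hinf : [' '] <:+: name.toList := by
      obtain ⟨pre, suf, he⟩ := List.append_of_mem hmem
      exact ⟨pre, suf, by rw [he]; simp⟩
    have hfind : PySem.Str.find name " " ≠ -1 := by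
      rw [PySem.Str.find_ne_neg_one_iff]; simpa using hinf
    rw [if_neg hfind]
    set i := PySem.Str.find name " " with hi
    have hieq : i = PySem.Chars.find name.toList " ".toList := by
      rw [hi, PySem.Str.find_eq]
    have hpos : 0 ≤ i := by
      have := PySem.Chars.neg_one_le_find name.toList " ".toList
      rw [← hieq] at this
      omega
    have hspec := PySem.Chars.find_spec (s := name.toList) (sub := " ".toList)
      (by rw [← hieq]; exact hpos)
    rw [← hieq] at hspec
    obtain ⟨hpre, hmin⟩ := hspec
    obtain ⟨t, ht⟩ := hpre
    have hd : List.drop i.toNat name.toList = ' ' :: t := by simpa using ht.symm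
    have hnlt : i.toNat < name.toList.length := by
      by_contra hge
      rw [not_lt] at hge
      rw [List.drop_eq_nil_of_le hge] at hd
      exact List.cons_ne_nil _ _ hd.symm
    have hit : name.toList[i.toNat]'hnlt = ' ' := by
      rw [List.drop_eq_getElem_cons hnlt] at hd
      exact (List.cons_eq_cons.mp hd).1
    have hall : ∀ j (h : j < i.toNat), name.toList[j]'(by omega) ≠ ' ' := by
      intro j hj hcon
      exact hmin j hj ⟨(name.toList.drop j).tail, by
        rw [List.drop_eq_getElem_cons (by omega)]
        simp [hcon]⟩
    have hdw : name.toList.dropWhile (· ≠ ' ') = name.toList.drop i.toNat :=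
      pvDropWhile_eq_drop name.toList i.toNat hnlt hall hit
    have hslice : (PySem.Str.slice name (some (i + 1)) none).toList
        = name.toList.drop (i + 1).toNat := by
      rw [PySem.Str.toList_slice, PySem.Chars.slice_eq_listSlice,
        PySem.List.slice_from _ (by omega)]
    apply String.toList_injective
    rw [String.toList_ofList, hslice, hdw, List.tail_drop]
    congr 1
    omega
  · have hfind : PySem.Str.find name " " = -1 := by
      rw [PySem.Str.find_eq_neg_one_iff]
      intro hinf
      exact hmem (hinf.mem (by simp))
    rw [if_pos hfind, pv_no_space _ hmem]
    rfl

-- ===== VERDICT (by name: the statement is the Claim_ definition above) =====
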